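-- pv_equiv track=rewrite | github.com/ByeongJun99/Baekjoon_online_judge | 프로그래머스/1/12947. 하샤드 수/하샤드 수.py | solution
-- ===== SOURCE A (Python) =====
-- def solution(x):
--     str_x = str(x)
--     sum = 0
--
--     for i in str_x:
--         sum += int(i)
--
--     if x % sum == 0:
--         answer = True
--     else:
--         answer = False
--     return answer
-- ===== SOURCE B (Python) =====
-- def solution(x):
--     s = 0
--     n = x
--     while n > 0:
--         s += n % 10
--         n //= 10
--     return x % s == 0
-- ===== Notes on version B (the rewrite author's own statement) =====
-- stated objective: alternative
-- what changed: B extracts digits arithmetically with n % 10 / n //= 10 instead of converting x to a string and parsing each character back with int().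
import Mathlib
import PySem

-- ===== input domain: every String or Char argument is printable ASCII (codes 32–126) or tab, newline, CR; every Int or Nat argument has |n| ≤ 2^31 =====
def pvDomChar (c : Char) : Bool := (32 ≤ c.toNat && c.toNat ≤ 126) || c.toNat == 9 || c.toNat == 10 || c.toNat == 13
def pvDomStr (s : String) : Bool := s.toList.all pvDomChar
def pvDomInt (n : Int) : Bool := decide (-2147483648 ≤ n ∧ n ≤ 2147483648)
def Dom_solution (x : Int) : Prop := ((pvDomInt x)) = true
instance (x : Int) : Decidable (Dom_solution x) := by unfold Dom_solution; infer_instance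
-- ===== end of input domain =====

-- B replaces A's string conversion + per-character int() parsing by arithmetic digit
-- extraction (n % 10 / n //= 10); return values agree on all x with 0 < x (A raises elsewhere).

-- ===== PORT A =====
-- for i in str_x: sum += int(i)   — int(i) raises ValueError on '-', modelled by Option
def solution (x : Int) : Bool :=
  let str_x := PySem.Int.toStr x
  let sum := str_x.toList.foldl
    (fun acc c => acc.bind (fun a => (PySem.Int.ofChars? [c]).map (fun v => a + v)))
    (some (0 : Int))
  match sum with
  | none => false                 -- int(i) raised ValueError
  | some s =>
    match PySem.Int.mod? x s with
    | none => false               -- ZeroDivisionError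
    | some r => decide (r = 0)

-- ===== PORT B =====
-- while n > 0: s += n % 10; n //= 10
def solutionAltLoop (s n : Int) : Int :=
  if h : 0 < n then
    solutionAltLoop (s + PySem.Int.mod n 10) (PySem.Int.floordiv n 10)
  else s
termination_by n.toNat
decreasing_by
  have h2 : PySem.Int.floordiv n 10 = n / 10 := PySem.Int.floordiv_eq_ediv_of_pos (by omega)
  rw [h2]; omega

def solution_alt (x : Int) : Bool :=
  let s := solutionAltLoop 0 x
  match PySem.Int.mod? x s with
  | none => false                 -- ZeroDivisionError
  | some r => decide (r = 0)

-- ===== PRECONDITION & SPEC =====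
-- Pre_ excludes exactly the inputs where A raises: x < 0 (ValueError on int('-')) and x = 0 (ZeroDivisionError).
def Pre_solution (x : Int) : Prop := 0 < x
instance (x : Int) : Decidable (Pre_solution x) := by unfold Pre_solution; infer_instance
def pvWitness_solution : Int := (18)
def Spec_solution (x : Int) (out : Bool) : Prop := out = solution_alt x
instance (x : Int) (out : Bool) : Decidable (Spec_solution x out) := by unfold Spec_solution; infer_instance

-- ===== CLAIM (what is proved, stated in full; the proofs are below) =====
def Claim_equal_solution : Prop := ∀ (x : Int), Dom_solution x → Pre_solution x → Spec_solution x (solution x)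

-- ===== LEMMAS AND PROOFS =====

-- digit sum of a natural number (proof-side helper)
def digitSumN (n : Nat) : Int :=
  if n = 0 then 0 else (n % 10 : Nat) + digitSumN (n / 10)

-- B's loop computes s + digit sum
theorem solutionAltLoop_eq (n : Nat) : ∀ s : Int, solutionAltLoop s (n : Int) = s + digitSumN n := by
  induction n using Nat.strong_induction_on with
  | _ n ih =>
    intro s
    rw [solutionAltLoop]
    by_cases h0 : n = 0
    · subst h0; simp [digitSumN]
    · have hpos : (0 : Int) < (n : Int) := by exact_mod_cast Nat.pos_of_ne_zero h0
      rw [dif_pos hpos]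
      have hd : PySem.Int.floordiv (n : Int) 10 = ((n / 10 : Nat) : Int) :=
        PySem.Int.floordiv_natCast n 10
      have hm : PySem.Int.mod (n : Int) 10 = ((n % 10 : Nat) : Int) :=
        PySem.Int.mod_natCast n 10
      rw [hd, hm, digitSumN, if_neg h0,
        ih (n / 10) (Nat.div_lt_self (Nat.pos_of_ne_zero h0) (by omega))]
      ring

-- parsing a single decimal digit character
theorem ofChars_digitChar (d : Nat) (hd : d < 10) :
    PySem.Int.ofChars? [Nat.digitChar d] = some (d : Int) := by
  interval_cases d <;> decide

-- A's character fold over toDigitsCore output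
theorem fold_toDigitsCore (f : Nat) :
    ∀ (n : Nat) (acc : List Char) (init : Int), n < 10 ^ f →
    (Nat.toDigitsCore 10 f n acc).foldl
      (fun a c => a.bind (fun v => (PySem.Int.ofChars? [c]).map (fun w => v + w)))
      (some init)
    = acc.foldl
      (fun a c => a.bind (fun v => (PySem.Int.ofChars? [c]).map (fun w => v + w)))
      (some (init + digitSumN n)) := by
  induction f with
  | zero =>
    intro n acc init h
    have hn : n = 0 := by simpa using h
    subst hn
    rw [Nat.toDigitsCore]
    simp [digitSumN]
  | succ f ih =>
    intro n acc init h
    rw [Nat.toDigitsCore]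
    by_cases hz : n / 10 = 0
    · have hn : n < 10 := by omega
      rw [if_pos hz]
      simp only [List.foldl_cons, Option.bind_some,
        ofChars_digitChar (n % 10) (Nat.mod_lt _ (by omega)), Option.map_some]
      have : digitSumN n = ((n % 10 : Nat) : Int) := by
        by_cases h0 : n = 0
        · subst h0; simp [digitSumN]
        · rw [digitSumN, if_neg h0, hz]; simp [digitSumN]
      rw [this]
    · rw [if_neg hz]
      have hlt : n / 10 < 10 ^ f := by
        have hp : 10 ^ (f + 1) = 10 ^ f * 10 := by ring
        omega
      rw [ih (n / 10) _ init hlt]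
      simp only [List.foldl_cons, Option.bind_some,
        ofChars_digitChar (n % 10) (Nat.mod_lt _ (by omega)), Option.map_some]
      have h0 : n ≠ 0 := by omega
      have : digitSumN n = digitSumN (n / 10) + ((n % 10 : Nat) : Int) := by
        rw [digitSumN, if_neg h0]; ring
      rw [this]; ring_nf

theorem lt_ten_pow (n : Nat) : n < 10 ^ (n + 1) := by
  calc n < 2 ^ n := Nat.lt_two_pow_self
    _ ≤ 10 ^ n := Nat.pow_le_pow_left (by omega) n
    _ < 10 ^ (n + 1) := Nat.pow_lt_pow_succ (by omega)

-- A's summed value on a positive input is the digit sum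
theorem solution_sum (x : Int) (hx : 0 < x) :
    (PySem.Int.toStr x).toList.foldl
      (fun a c => a.bind (fun v => (PySem.Int.ofChars? [c]).map (fun w => v + w)))
      (some (0 : Int)) = some (digitSumN x.toNat) := by
  rw [PySem.Int.toList_toStr, PySem.Int.toChars, if_neg (by omega), Nat.toDigits]
  rw [fold_toDigitsCore (x.toNat + 1) x.toNat [] 0 (lt_ten_pow x.toNat)]
  simp

-- ===== VERDICT (by name: the statement is the Claim_ definition above) =====
theorem solution_spec : Claim_equal_solution := by
  intro x _ hx
  unfold Spec_solution solution solution_alt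
  simp only [solution_sum x hx]
  have : solutionAltLoop 0 x = digitSumN x.toNat := by
    have := solutionAltLoop_eq x.toNat 0
    rw [Int.toNat_of_nonneg (le_of_lt hx)] at this
    simpa using this
  rw [this]
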